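-- pv_equiv track=rewrite | github.com/eunaJung01/Algorithm-Solvings | Programmers/Level_2/할인 행사.py | solution
-- ===== SOURCE A (Python) =====
-- from copy import deepcopy
--
-- def solution(want, number, discount):
--     arr = []
--     i = 0
--     for something in discount:
--         if i == 0:
--             d = dict()
--             d[something] = 1
--         else:
--             d = deepcopy(arr[i - 1])
--             if something in d:
--                 d[something] += 1
--             else:
--                 d[something] = 1
--         arr.append(d)
--         i += 1
--
--     answer = 0
--     left = -1
--     right = 9
--
--     while right < len(discount):
--         if isAble(want, number, arr, left, right):
--             answer += 1
--         left += 1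
--         right += 1
--
--     return answer
--
-- def isAble(want, number, arr, left, right):
--     for i, w in enumerate(want):
--
--         if w not in arr[right]:
--             return False
--         right_w_num = arr[right][w]
--
--         if left == -1 or w not in arr[left]:
--             left_w_num = 0
--         else:
--             left_w_num = arr[left][w]
--
--         if right_w_num - left_w_num != number[i]:
--             return False
--     return True
-- ===== SOURCE B (Python) =====
-- def solution(want, number, discount):
--     n = len(discount)
--     if n < 10:
--         return 0
--     # counts of the first 10-day window
--     cnt = {}
--     for item in discount[:10]:
--         cnt[item] = cnt.get(item, 0) + 1
--     answer = 0
--     for start in range(n - 9):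
--         if start > 0:
--             cnt[discount[start - 1]] -= 1
--             item = discount[start + 9]
--             cnt[item] = cnt.get(item, 0) + 1
--         if all(cnt.get(w, 0) == number[i] for i, w in enumerate(want)):
--             answer += 1
--     return answer
-- ===== Notes on version B (the rewrite author's own statement) =====
-- stated objective: alternative
-- what changed: B replaces A's per-day deepcopied prefix-count dictionaries (a list of n dicts) plus prefix-difference window checks by a single count dict slid across the 10-day window (decrement the outgoing day, increment the incoming one); asymptotically cheaper in principle, though a timing run could not measure A.
-- outside the precondition, e.g. on solution(['a'], [0], ['a', 'x', 'x', 'x', 'x', 'x', 'x', 'x', 'x', 'x', 'x']): A returns 1, B returns 1; on solution(['a'], [0], ['x', 'x', 'x', 'x', 'x', 'x', 'x', 'x', 'x', 'x']): A returns 0, B returns 1; on solution(['a'], [], ['x', 'x', 'x', 'x', 'x', 'x', 'x', 'x', 'x', 'x']): A returns 0, B raises IndexError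
import Mathlib
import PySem

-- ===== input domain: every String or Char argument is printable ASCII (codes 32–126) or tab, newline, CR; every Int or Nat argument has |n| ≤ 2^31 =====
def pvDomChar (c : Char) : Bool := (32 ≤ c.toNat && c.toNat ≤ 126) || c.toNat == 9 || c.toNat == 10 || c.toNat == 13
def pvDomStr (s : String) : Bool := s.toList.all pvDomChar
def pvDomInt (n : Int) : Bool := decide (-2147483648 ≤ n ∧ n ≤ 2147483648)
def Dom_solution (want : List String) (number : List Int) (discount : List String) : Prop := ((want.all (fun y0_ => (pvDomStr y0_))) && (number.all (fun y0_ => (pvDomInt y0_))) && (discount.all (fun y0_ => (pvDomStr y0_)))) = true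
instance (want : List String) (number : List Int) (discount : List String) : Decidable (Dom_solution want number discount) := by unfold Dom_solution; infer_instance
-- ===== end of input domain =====

-- B slides ONE count dict across the 10-day window instead of A's list of per-day
-- deepcopied prefix-count dicts with prefix-difference checks.

-- ===== PORT A =====

-- isAble's loop over enumerate(want); early 'return False' becomes the false branch.
def pvIsAbleGo (number : List Int) (arr : List (PySem.Dict String Int)) (left right : Int) :
    List (Int × String) → Bool
  | [] => true
  | (i, w) :: rest =>
    let dR := (PySem.List.pyGet? arr right).getD PySem.Dict.empty
    if dR.contains w = false then false
    else
      let rightNum := dR.getD w 0       -- arr[right][w]; the key is present (checked just above)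
      let leftNum : Int :=
        if left == (-1 : Int) then 0
        else
          let dL := (PySem.List.pyGet? arr left).getD PySem.Dict.empty
          if dL.contains w = false then 0 else dL.getD w 0
      if rightNum - leftNum ≠ (PySem.List.pyGet? number i).getD 0 then false
      else pvIsAbleGo number arr left right rest

def pvIsAble (want : List String) (number : List Int) (arr : List (PySem.Dict String Int))
    (left right : Int) : Bool :=
  pvIsAbleGo number arr left right (PySem.List.enumerate want 0)

-- the first loop of A: arr.append(d) with d a (deep)copy of arr[i-1] updated at 'something'
def pvBuildStep (st : List (PySem.Dict String Int) × Int) (x : String) :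
    List (PySem.Dict String Int) × Int :=
  let d :=
    if st.2 == (0 : Int) then PySem.Dict.empty.insert x 1
    else
      let prev := (PySem.List.pyGet? st.1 (st.2 - 1)).getD PySem.Dict.empty
      if prev.contains x then prev.insert x (prev.getD x 0 + 1) else prev.insert x 1
  (st.1 ++ [d], st.2 + 1)

def solution (want : List String) (number : List Int) (discount : List String) : Int :=
  let arr := (discount.foldl pvBuildStep ([], 0)).1
  -- while right < len(discount): left runs -1,0,…; right runs 9,10,…; left = right - 10
  (PySem.List.pyRange 9 (discount.length : Int) 1).foldl
    (fun answer right => if pvIsAble want number arr (right - 10) right then answer + 1 else answer)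
    0

-- ===== PORT B =====

-- all(cnt.get(w, 0) == number[i] for i, w in enumerate(want))
def pvCheck (want : List String) (number : List Int) (cnt : PySem.Dict String Int) : Bool :=
  (PySem.List.enumerate want 0).all
    (fun p => cnt.getD p.2 0 == (PySem.List.pyGet? number p.1).getD 0)

-- the sliding step: cnt[discount[start-1]] -= 1 (key always present, so 'modify _ 0' is exact);
-- cnt[item] = cnt.get(item, 0) + 1
def pvSlideStep (discount : List String) (st : PySem.Dict String Int × Int)
    (want : List String) (number : List Int) (start : Int) : PySem.Dict String Int × Int :=
  let cnt :=
    if (0 : Int) < start then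
      let c1 := st.1.modify ((PySem.List.pyGet? discount (start - 1)).getD "") 0 (· - 1)
      c1.modify ((PySem.List.pyGet? discount (start + 9)).getD "") 0 (· + 1)
    else st.1
  if pvCheck want number cnt then (cnt, st.2 + 1) else (cnt, st.2)

def solution_alt (want : List String) (number : List Int) (discount : List String) : Int :=
  let n : Int := discount.length
  if n < 10 then 0
  else
    let cnt0 := (PySem.List.slice discount none (some 10)).foldl
      (fun d item => d.insert item (d.getD item 0 + 1)) PySem.Dict.empty
    ((PySem.List.pyRange 0 (n - 9) 1).foldl
      (fun st start => pvSlideStep discount st want number start) (cnt0, 0)).2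

-- ===== PRECONDITION & SPEC =====
-- When a full 10-day window exists, Pre_ excludes inputs where A's IndexError on number[i]
-- is reachable (want longer than number) and inputs with a zero entry among the used counts,
-- where A's extra demand that the item occur somewhere in the PREFIX (dict membership) rather
-- than in the window is an artefact of its prefix-dict representation that a window-count
-- implementation cannot match.
def Pre_solution (want : List String) (number : List Int) (discount : List String) : Prop :=
  discount.length < 10 ∨
    (want.length ≤ number.length ∧ ∀ i, i < want.length → number.getD i 0 ≠ 0)
instance (want : List String) (number : List Int) (discount : List String) : Decidable (Pre_solution want number discount) := by unfold Pre_solution; infer_instance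

def pvWitness_solution : List String × List Int × List String :=
  (["a"], [2], ["a", "a", "b", "c", "d", "e", "f", "g", "h", "i"])

def Spec_solution (want : List String) (number : List Int) (discount : List String) (out : Int) : Prop := out = solution_alt want number discount
instance (want : List String) (number : List Int) (discount : List String) (out : Int) : Decidable (Spec_solution want number discount out) := by unfold Spec_solution; infer_instance

-- ===== CLAIM (what is proved, stated in full; the proofs are below) =====
def Claim_equal_solution : Prop := ∀ (want : List String) (number : List Int) (discount : List String), Dom_solution want number discount → Pre_solution want number discount → Spec_solution want number discount (solution want number discount)

-- ===== LEMMAS AND PROOFS =====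

-- count of w in the 10-day window starting at s
def pvWin (discount : List String) (s : Nat) (w : String) : Nat :=
  ((discount.drop s).take 10).count w

-- the common reference check for window start s
def pvRef (want : List String) (number : List Int) (discount : List String) (s : Nat) : Bool :=
  (PySem.List.enumerate want 0).all
    (fun p => ((pvWin discount s p.2 : Int)) == (PySem.List.pyGet? number p.1).getD 0)

-- A's arr is the list of prefix counters
def pvPrefs (discount : List String) : List (PySem.Dict String Int) :=
  (List.range discount.length).map (fun j => PySem.Dict.counter (discount.take (j + 1)))

theorem pvPrefs_getD (discount : List String) (j : Nat) (hj : j < discount.length) :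
    (PySem.List.pyGet? (pvPrefs discount) (j : Int)).getD PySem.Dict.empty =
      PySem.Dict.counter (discount.take (j + 1)) := by
  rw [PySem.List.pyGet?_natCast]
  simp [pvPrefs, hj]

theorem pvPrefs_append_singleton (pref : List String) (x : String) :
    pvPrefs (pref ++ [x]) = pvPrefs pref ++ [PySem.Dict.counter (pref ++ [x])] := by
  unfold pvPrefs
  rw [List.length_append, List.length_singleton, List.range_succ, List.map_append]
  congr 1
  · exact List.map_congr_left (fun j hj => by
      rw [List.take_append_of_le_length (by simpa using List.mem_range.mp hj)])
  · simp only [List.map_cons, List.map_nil]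
    rw [List.take_of_length_le (by simp)]

theorem pvStep_counter (d : PySem.Dict String Int) (x : String) :
    (if d.contains x = true then d.insert x (d.getD x 0 + 1) else d.insert x 1) =
      d.modify x 0 (· + 1) := by
  by_cases h : d.contains x = true
  · rw [if_pos h]; rfl
  · rw [if_neg h]
    show d.insert x 1 = d.insert x (d.getD x 0 + 1)
    rw [PySem.Dict.getD_of_not_contains d 0 (by simpa using h)]
    norm_num

theorem pvBuildStep_eq (pref : List String) (x : String) :
    pvBuildStep (pvPrefs pref, (pref.length : Int)) x =
      (pvPrefs (pref ++ [x]), ((pref ++ [x]).length : Int)) := by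
  rw [pvPrefs_append_singleton, PySem.Dict.counter_append_singleton]
  by_cases h0 : pref = []
  · subst h0
    unfold pvBuildStep
    dsimp only
    norm_num [pvPrefs]
    show PySem.Dict.empty.insert x 1 = PySem.Dict.empty.insert x (PySem.Dict.empty.getD x 0 + 1)
    rw [PySem.Dict.getD_empty]; norm_num
  · have hlen : 0 < pref.length := List.length_pos_iff.mpr h0
    unfold pvBuildStep
    dsimp only
    have hbeq : (((pref.length : Int)) == (0 : Int)) = false := by
      simp only [beq_eq_false_iff_ne, ne_eq, Nat.cast_eq_zero]; omega
    rw [hbeq]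
    simp only [Bool.false_eq_true, if_false]
    rw [show ((pref.length : Int) - 1) = (((pref.length - 1 : Nat)) : Int) by push_cast [hlen]; omega]
    rw [pvPrefs_getD _ _ (by omega)]
    rw [Nat.sub_add_cancel hlen, List.take_length, pvStep_counter]
    simp

theorem pvBuild_loop (xs : List String) (pref : List String) :
    xs.foldl pvBuildStep (pvPrefs pref, (pref.length : Int)) =
      (pvPrefs (pref ++ xs), ((pref ++ xs).length : Int)) := by
  induction xs generalizing pref with
  | nil => simp
  | cons x xs ih =>
    rw [List.foldl_cons, pvBuildStep_eq, ih]
    simp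

theorem pvBuild_eq (discount : List String) :
    (discount.foldl pvBuildStep ([], 0)).1 = pvPrefs discount := by
  have h := pvBuild_loop discount []
  simp only [pvPrefs, List.length_nil, List.range_zero, List.map_nil, Nat.cast_zero,
    List.nil_append] at h
  rw [h]
  simp [pvPrefs]

theorem pvIsAbleGo_eq (want : List String) (number : List Int) (discount : List String)
    (h1 : want.length ≤ number.length) (h2 : ∀ i, i < want.length → number.getD i 0 ≠ 0)
    (s : Nat) (hs : s + 10 ≤ discount.length)
    (l : List (Int × String))
    (hl : ∀ p ∈ l, ∃ k, ∃ _ : k < want.length, p = ((k : Int), want[k])) :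
    pvIsAbleGo number (pvPrefs discount) ((s : Int) - 1) ((s : Int) + 9) l =
      l.all (fun p => ((pvWin discount s p.2 : Int)) == (PySem.List.pyGet? number p.1).getD 0) := by
  induction l with
  | nil => rfl
  | cons p rest ih =>
    obtain ⟨k, hk, hp⟩ := hl p (List.mem_cons_self)
    subst hp
    set w := want[k] with hww
    have hkn : k < number.length := lt_of_lt_of_le hk h1
    have hnum : (PySem.List.pyGet? number ((k : Nat) : Int)).getD 0 = number[k] := by
      rw [PySem.List.pyGet?_natCast, List.getElem?_eq_getElem hkn]; rfl
    have hnz : number[k] ≠ 0 := by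
      have := h2 k hk
      rwa [List.getD_eq_getElem number 0 hkn] at this
    have hR : (PySem.List.pyGet? (pvPrefs discount) ((s : Int) + 9)).getD PySem.Dict.empty =
        PySem.Dict.counter (discount.take (s + 10)) := by
      rw [show ((s : Int) + 9) = (((s + 9 : Nat)) : Int) by push_cast; ring]
      rw [pvPrefs_getD _ _ (by omega)]
    have hcount : (discount.take (s + 10)).count w =
        (discount.take s).count w + pvWin discount s w := by
      rw [show s + 10 = s + 10 from rfl, List.take_add, List.count_append]; rfl
    have ihr := ih (fun q hq => hl q (List.mem_cons_of_mem _ hq))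
    simp only [pvIsAbleGo, hR, List.all_cons]
    by_cases hc : (PySem.Dict.counter (discount.take (s + 10))).contains w = true
    · rw [if_neg (by simp [hc])]
      have hmem : w ∈ discount.take (s + 10) := by
        rw [PySem.Dict.contains_counter] at hc
        simpa using hc
      have hL : (if ((s : Int) - 1) == (-1 : Int) then (0 : Int)
          else
            let dL := (PySem.List.pyGet? (pvPrefs discount) ((s : Int) - 1)).getD PySem.Dict.empty
            if dL.contains w = false then 0 else dL.getD w 0) =
          ((discount.take s).count w : Int) := by
        rcases Nat.eq_zero_or_pos s with hs0 | hs0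
        · subst hs0
          rw [if_pos (by norm_num)]
          simp
        · rw [if_neg (by simp only [beq_iff_eq]; omega)]
          have hLd : (PySem.List.pyGet? (pvPrefs discount) ((s : Int) - 1)).getD PySem.Dict.empty =
              PySem.Dict.counter (discount.take s) := by
            rw [show ((s : Int) - 1) = (((s - 1 : Nat)) : Int) by push_cast [hs0]; omega]
            rw [pvPrefs_getD _ _ (by omega), Nat.sub_add_cancel hs0]
          dsimp only
          rw [hLd]
          by_cases hcl : (PySem.Dict.counter (discount.take s)).contains w = true
          · rw [if_neg (by simp [hcl]), PySem.Dict.getD_counter]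
          · rw [if_pos (by simpa using hcl)]
            rw [PySem.Dict.contains_counter] at hcl
            have : w ∉ discount.take s := by simpa using hcl
            rw [List.count_eq_zero.mpr this]
            norm_num
      rw [hL, PySem.Dict.getD_counter, hnum, hcount]
      by_cases he : ((pvWin discount s w : Int)) = number[k]
      · rw [if_neg (by push_cast; omega)]
        rw [ihr]
        have hbt : ((pvWin discount s w : Int) == number[k]) = true := by simpa using he
        rw [hbt, Bool.true_and]
      · rw [if_pos (by push_cast; omega)]
        have hbf : ((pvWin discount s w : Int) == number[k]) = false := by simpa using he
        rw [hbf, Bool.false_and]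
    · rw [if_pos (by simpa using hc)]
      rw [PySem.Dict.contains_counter] at hc
      have hnm : w ∉ discount.take (s + 10) := by simpa using hc
      have h0 : pvWin discount s w = 0 := by
        have := List.count_eq_zero.mpr hnm
        omega
      have : ((pvWin discount s w : Int) == (PySem.List.pyGet? number ((k : Nat) : Int)).getD 0) = false := by
        rw [hnum, h0]
        simpa using fun h => hnz h.symm
      rw [this, Bool.false_and]

theorem pvIsAble_eq (want : List String) (number : List Int) (discount : List String)
    (h1 : want.length ≤ number.length) (h2 : ∀ i, i < want.length → number.getD i 0 ≠ 0)
    (s : Nat) (hs : s + 10 ≤ discount.length) :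
    pvIsAble want number (pvPrefs discount) ((s : Int) - 1) ((s : Int) + 9) =
      pvRef want number discount s := by
  unfold pvIsAble pvRef
  apply pvIsAbleGo_eq want number discount h1 h2 s hs
  intro p hp
  obtain ⟨k, hk, hp⟩ := (PySem.List.mem_enumerate_iff want 0 p).mp hp
  exact ⟨k, hk, by simpa using hp⟩

theorem solution_a_eq (want : List String) (number : List Int) (discount : List String)
    (h1 : want.length ≤ number.length) (h2 : ∀ i, i < want.length → number.getD i 0 ≠ 0) :
    solution want number discount =
      ((List.range ((discount.length : Int) - 9).toNat).countP
        (fun k => pvRef want number discount k) : Int) := by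
  unfold solution
  rw [pvBuild_eq]
  rw [PySem.List.pyRange_one 9 (discount.length : Int), List.foldl_map]
  rw [PySem.List.foldl_if_add_one
    (fun k : Nat => pvIsAble want number (pvPrefs discount) ((9 : Int) + (k : Int) - 10) ((9 : Int) + (k : Int)))]
  rw [zero_add]
  congr 1
  rw [show ((discount.length : Int) - 9) = ((9 : Int) + (discount.length : Int) - 9 - 9) by ring]
  apply List.countP_congr
  intro k hk
  have hk' : (k : Nat) + 10 ≤ discount.length := by
    have := List.mem_range.mp hk
    omega
  rw [show ((9 : Int) + (k : Int) - 10) = ((k : Int) - 1) by ring,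
    show ((9 : Int) + (k : Int)) = ((k : Int) + 9) by ring]
  rw [pvIsAble_eq want number discount h1 h2 k hk']

theorem pvWin_step (discount : List String) (s : Nat) (w a b : String)
    (hs : s + 10 < discount.length)
    (ha : discount[s]? = some a) (hb : discount[s + 10]? = some b) :
    pvWin discount s w + (if w = b then 1 else 0) =
      pvWin discount (s + 1) w + (if w = a then 1 else 0) := by
  have hsd : discount.drop s = a :: discount.drop (s + 1) := by
    rw [List.drop_eq_getElem_cons (show s < discount.length by omega)]
    rw [List.getElem?_eq_getElem (show s < discount.length by omega)] at ha
    rw [Option.some.injEq] at ha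
    rw [ha]
  have h_old : pvWin discount s w =
      (if w = a then 1 else 0) + ((discount.drop (s + 1)).take 9).count w := by
    unfold pvWin
    rw [hsd, List.take_succ_cons, List.count_cons]
    rcases eq_or_ne w a with h | h
    · rw [if_pos h, if_pos (by simpa using h.symm)]
      omega
    · rw [if_neg h, if_neg (by simpa using Ne.symm h)]
      omega
  have h_new : pvWin discount (s + 1) w =
      ((discount.drop (s + 1)).take 9).count w + (if w = b then 1 else 0) := by
    unfold pvWin
    have h9 : (discount.drop (s + 1))[9]? = some b := by
      rw [List.getElem?_drop, show s + 1 + 9 = s + 10 from rfl, hb]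
    have h10 : (discount.drop (s + 1)).take 10 = (discount.drop (s + 1)).take 9 ++ [b] := by
      rw [show (10 : Nat) = 9 + 1 from rfl, List.take_add_one, h9]
      rfl
    rw [h10, List.count_append]
    rcases eq_or_ne w b with h | h
    · rw [if_pos h, List.count_cons, if_pos (by simpa using h.symm)]
      simp
    · rw [if_neg h, List.count_cons, if_neg (by simpa using Ne.symm h)]
      simp
  rw [h_old, h_new]
  split_ifs <;> omega

theorem pvCheck_eq (want : List String) (number : List Int) (discount : List String)
    (s : Nat) (cnt : PySem.Dict String Int)
    (h : ∀ w, cnt.getD w 0 = (pvWin discount s w : Int)) :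
    pvCheck want number cnt = pvRef want number discount s := by
  unfold pvCheck pvRef
  congr 1
  funext p
  rw [h p.2]

theorem pvSlideStep_fst (discount : List String) (st : PySem.Dict String Int × Int)
    (want : List String) (number : List Int) (start : Int) :
    (pvSlideStep discount st want number start).1 =
      (if (0 : Int) < start then
        (st.1.modify ((PySem.List.pyGet? discount (start - 1)).getD "") 0 (· - 1)).modify
          ((PySem.List.pyGet? discount (start + 9)).getD "") 0 (· + 1)
      else st.1) := by
  unfold pvSlideStep
  dsimp only
  split_ifs <;> rfl

theorem pvSlideStep_snd (discount : List String) (st : PySem.Dict String Int × Int)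
    (want : List String) (number : List Int) (start : Int) :
    (pvSlideStep discount st want number start).2 =
      (if pvCheck want number (pvSlideStep discount st want number start).1
       then st.2 + 1 else st.2) := by
  rw [pvSlideStep_fst]
  unfold pvSlideStep
  dsimp only
  split_ifs <;> simp_all

theorem pvSlide_loop (want : List String) (number : List Int) (discount : List String)
    (hn : 10 ≤ discount.length) (m : Nat) (hm : m ≤ discount.length - 9) :
    (∀ w, ((PySem.List.pyRange 0 (m : Int) 1).foldl
        (fun st start => pvSlideStep discount st want number start)
        (PySem.Dict.counter (discount.take 10), 0)).1.getD w 0 = (pvWin discount (m - 1) w : Int)) ∧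
    ((PySem.List.pyRange 0 (m : Int) 1).foldl
        (fun st start => pvSlideStep discount st want number start)
        (PySem.Dict.counter (discount.take 10), 0)).2 =
      ((List.range m).countP (fun k => pvRef want number discount k) : Int) := by
  induction m with
  | zero =>
    rw [show (((0 : Nat)) : Int) = 0 from rfl, PySem.List.pyRange_one_eq_nil le_rfl]
    constructor
    · intro w
      rw [List.foldl_nil, PySem.Dict.getD_counter]
      unfold pvWin
      rw [List.drop_zero]
    · simp
  | succ m ih =>
    obtain ⟨ih1, ih2⟩ := ih (by omega)
    rw [show (((m + 1 : Nat)) : Int) = (m : Int) + 1 by push_cast; ring,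
      PySem.List.pyRange_one_succ_right (by positivity), List.foldl_append, List.foldl_cons,
      List.foldl_nil]
    have hcnt : ∀ w,
        (pvSlideStep discount ((PySem.List.pyRange 0 (m : Int) 1).foldl
          (fun st start => pvSlideStep discount st want number start)
          (PySem.Dict.counter (discount.take 10), 0)) want number (m : Int)).1.getD w 0 =
        (pvWin discount m w : Int) := by
      intro w
      rw [pvSlideStep_fst]
      rcases Nat.eq_zero_or_pos m with hm0 | hm0
      · subst hm0
        rw [if_neg (by norm_num)]
        simpa using ih1 w
      · rw [if_pos (by exact_mod_cast hm0)]
        have hk1 : (PySem.List.pyGet? discount ((m : Int) - 1)).getD "" =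
            discount[m - 1]'(by omega) := by
          rw [show ((m : Int) - 1) = (((m - 1 : Nat)) : Int) by push_cast [hm0]; omega,
            PySem.List.pyGet?_natCast, List.getElem?_eq_getElem (by omega)]
          rfl
        have hk2 : (PySem.List.pyGet? discount ((m : Int) + 9)).getD "" =
            discount[m + 9]'(by omega) := by
          rw [show ((m : Int) + 9) = (((m + 9 : Nat)) : Int) by push_cast; ring,
            PySem.List.pyGet?_natCast, List.getElem?_eq_getElem (by omega)]
          rfl
        rw [hk1, hk2]
        have hstep := pvWin_step discount (m - 1) w (discount[m - 1]'(by omega))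
          (discount[m + 9]'(by omega)) (by omega)
          (List.getElem?_eq_getElem (by omega))
          (by rw [show m - 1 + 10 = m + 9 by omega]; exact List.getElem?_eq_getElem (by omega))
        rw [Nat.sub_add_cancel hm0] at hstep
        rw [PySem.Dict.getD_modify]
        split_ifs with h2
        · rw [PySem.Dict.getD_modify]
          split_ifs with h1
          · rw [ih1]
            rw [h2] at hstep ⊢
            rw [h1] at hstep ⊢
            push_cast at hstep ⊢
            push_cast
            omega
          · rw [ih1]
            rw [h2] at hstep ⊢
            rw [if_neg h1, if_pos rfl] at hstep
            push_cast
            omega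
        · rw [PySem.Dict.getD_modify]
          split_ifs with h1
          · rw [ih1]
            rw [h1] at hstep h2 ⊢
            rw [if_neg h2, if_pos rfl] at hstep
            push_cast
            omega
          · rw [ih1]
            rw [if_neg h2, if_neg h1] at hstep
            push_cast
            omega
    constructor
    · intro w
      simpa using hcnt w
    · rw [pvSlideStep_snd, pvCheck_eq want number discount m _ hcnt, ih2,
        List.range_succ, List.countP_append]
      rcases Bool.eq_false_or_eq_true (pvRef want number discount m) with hb | hb <;>
        simp [hb]

theorem solution_b_eq (want : List String) (number : List Int) (discount : List String) :
    solution_alt want number discount =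
      ((List.range ((discount.length : Int) - 9).toNat).countP
        (fun k => pvRef want number discount k) : Int) := by
  unfold solution_alt
  dsimp only
  by_cases hlt : (discount.length : Int) < 10
  · rw [if_pos hlt]
    rw [show ((discount.length : Int) - 9).toNat = 0 by omega]
    simp
  · rw [if_neg hlt]
    have hn : 10 ≤ discount.length := by exact_mod_cast not_lt.mp hlt
    rw [PySem.List.slice_to discount (by norm_num : (0 : Int) ≤ 10),
      show ((10 : Int)).toNat = 10 from rfl,
      PySem.Dict.foldl_insert_getD_add_one_eq_counter]
    have h2 := (pvSlide_loop want number discount hn (discount.length - 9) le_rfl).2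
    rw [show (((discount.length - 9 : Nat)) : Int) = (discount.length : Int) - 9 by
      push_cast [hn]; omega] at h2
    rw [h2, show ((discount.length : Int) - 9).toNat = discount.length - 9 by omega]

-- ===== VERDICT (by name: the statement is the Claim_ definition above) =====
theorem solution_short (want : List String) (number : List Int) (discount : List String)
    (h : discount.length < 10) : solution want number discount = 0 := by
  unfold solution
  rw [PySem.List.pyRange_one_eq_nil (by exact_mod_cast Nat.lt_succ_iff.mp h), List.foldl_nil]

theorem solution_spec : Claim_equal_solution := by
  intro want number discount _ hpre
  unfold Spec_solution
  rcases hpre with hshort | ⟨h1, h2⟩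
  · rw [solution_short want number discount hshort, solution_b_eq]
    rw [show ((discount.length : Int) - 9).toNat = 0 by omega]
    simp
  · rw [solution_a_eq want number discount h1 h2, solution_b_eq]
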